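-- pv_equiv track=rewrite | github.com/bichngocdo/neural-tree-reranking | rcnnrr/reranker_rcnn/data_reader.py | _bfs
-- ===== SOURCE A (Python) =====
-- from collections import deque
--
-- def _bfs(heads, root=0):
--     n = len(heads)
--     visited = set()
--     result = list()
--     time = [-1] * (len(heads) + 1)
--     queue = deque()
--     queue.append(root)
--     t = 0
--     while len(visited) <= n:
--         while len(queue) > 0:
--             current = queue.popleft()
--             visited.add(current)
--             result.append(current)
--             time[current] = t
--             t += 1
--             for i in range(n):
--                 if heads[i] == current and (i + 1) not in visited:
--                     queue.append(i + 1)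
--         for i in range(n):
--             if (i + 1) not in visited:
--                 queue.append(i + 1)
--                 break
--     return result, time
-- ===== SOURCE B (Python) =====
-- from collections import deque
--
--
-- def _bfs(heads, root=0):
--     n = len(heads)
--     children = {}
--     for i, h in enumerate(heads):
--         children.setdefault(h, []).append(i + 1)
--     visited = set()
--     result = []
--     time = [-1] * (n + 1)
--
--     def visit_from(start, t):
--         queue = deque([start])
--         while queue:
--             cur = queue.popleft()
--             visited.add(cur)
--             result.append(cur)
--             time[cur] = t
--             t += 1
--             for c in children.get(cur, []):
--                 if c not in visited:
--                     queue.append(c)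
--         return t
--
--     t = visit_from(root, 0)
--     for u in range(1, n + 1):
--         if u not in visited:
--             t = visit_from(u, t)
--     return result, time
-- ===== Notes on version B (the rewrite author's own statement) =====
-- stated objective: faster
-- what changed: A rescans all of heads for every visited node and rescans 1..n after every component; B builds a children adjacency dict once and makes a single pass over 1..n for restarts. Intended as faster (quadratic to linear); a timing run could not measure a ratio because A already timed out at n=16 where B returned.
import Mathlib
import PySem

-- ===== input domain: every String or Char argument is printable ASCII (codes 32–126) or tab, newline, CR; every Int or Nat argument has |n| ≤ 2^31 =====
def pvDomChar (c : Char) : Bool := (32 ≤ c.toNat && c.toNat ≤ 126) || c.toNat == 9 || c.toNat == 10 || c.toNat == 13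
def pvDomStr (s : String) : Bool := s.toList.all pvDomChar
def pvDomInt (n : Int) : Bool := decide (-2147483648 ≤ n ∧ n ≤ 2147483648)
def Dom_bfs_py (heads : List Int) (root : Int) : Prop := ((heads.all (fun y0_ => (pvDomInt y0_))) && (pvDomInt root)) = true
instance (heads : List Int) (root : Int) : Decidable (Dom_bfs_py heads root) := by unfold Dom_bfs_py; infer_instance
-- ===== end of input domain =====

-- B replaces A's per-node rescan of `heads` by a children adjacency dict built once, and A's
-- repeated restart rescans by a single pass over 1..n (intended as faster; a timing run got
-- no clean ratio: A already timed out at n=16 where B returned).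
-- Loops are ported with a fuel parameter; on every input admitted by Pre_ the fuel never runs out.

-- ===== PORT A =====
-- child scan: `for i in range(n): if heads[i] == current and (i+1) not in visited: queue.append(i+1)`
def bfsA_scan (heads : List Int) (vis : PySem.Set Int) (cur : Int) (qs : List Int) : List Int :=
  (PySem.List.pyRange 0 (PySem.List.len heads)).foldl
    (fun q i => if (PySem.List.pyGetD heads i 0 == cur) && !(PySem.Set.contains vis (i + 1))
      then q ++ [i + 1] else q) qs

-- inner `while len(queue) > 0` loop of A
def bfsA_inner : Nat → List Int → PySem.Set Int → List Int → List Int → List Int → Int →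
    PySem.Set Int × List Int × List Int × Int
  | 0, _, vis, res, time, _, t => (vis, res, time, t)
  | fuel + 1, heads, vis, res, time, queue, t =>
    match queue with
    | [] => (vis, res, time, t)
    | cur :: qs =>
      let vis' := PySem.Set.add vis cur
      bfsA_inner fuel heads vis' (res ++ [cur]) (PySem.List.pySetD time cur t)
        (bfsA_scan heads vis' cur qs) (t + 1)

-- restart scan: `for i in range(n): if (i+1) not in visited: queue.append(i+1); break`
def bfsA_restart (heads : List Int) (vis : PySem.Set Int) : List Int :=
  match (PySem.List.pyRange 0 (PySem.List.len heads)).find?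
      (fun i => !(PySem.Set.contains vis (i + 1))) with
  | some i => [i + 1]
  | none => []

-- outer `while len(visited) <= n` loop of A
def bfsA_outer : Nat → List Int → PySem.Set Int → List Int → List Int → List Int → Int →
    List Int × List Int
  | 0, _, _, res, time, _, _ => (res, time)
  | fuel + 1, heads, vis, res, time, queue, t =>
    if PySem.Set.len vis ≤ PySem.List.len heads then
      match bfsA_inner (heads.length + 2) heads vis res time queue t with
      | (vis', res', time', t') =>
        bfsA_outer fuel heads vis' res' time' (bfsA_restart heads vis') t'
    else (res, time)

def bfs_py (heads : List Int) (root : Int) : List Int × List Int :=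
  bfsA_outer (heads.length + 3) heads PySem.Set.empty []
    (List.replicate (heads.length + 1) (-1)) [root] 0

-- ===== PORT B =====
-- `children = {}; for i, h in enumerate(heads): children.setdefault(h, []).append(i + 1)`
def bfsB_children (heads : List Int) : PySem.Dict Int (List Int) :=
  (PySem.List.enumerate heads).foldl
    (fun d p => d.modify p.2 [] (fun l => l ++ [p.1 + 1])) PySem.Dict.empty

-- `visit_from`: BFS of one component using the adjacency dict
def bfsB_visit : Nat → PySem.Dict Int (List Int) → PySem.Set Int → List Int → List Int →
    List Int → Int → PySem.Set Int × List Int × List Int × Int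
  | 0, _, vis, res, time, _, t => (vis, res, time, t)
  | fuel + 1, ch, vis, res, time, queue, t =>
    match queue with
    | [] => (vis, res, time, t)
    | cur :: qs =>
      let vis' := PySem.Set.add vis cur
      bfsB_visit fuel ch vis' (res ++ [cur]) (PySem.List.pySetD time cur t)
        ((ch.getD cur []).foldl (fun q c => if !(PySem.Set.contains vis' c) then q ++ [c] else q) qs)
        (t + 1)

-- `for u in range(1, n + 1): if u not in visited: t = visit_from(u, t)`
def bfsB_rest (ifuel : Nat) (ch : PySem.Dict Int (List Int)) :
    List Int → PySem.Set Int × List Int × List Int × Int →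
    PySem.Set Int × List Int × List Int × Int
  | [], st => st
  | u :: us, (vis, res, time, t) =>
    if PySem.Set.contains vis u then bfsB_rest ifuel ch us (vis, res, time, t)
    else bfsB_rest ifuel ch us (bfsB_visit ifuel ch vis res time [u] t)

def bfs_py_alt (heads : List Int) (root : Int) : List Int × List Int :=
  let ch := bfsB_children heads
  let st := bfsB_visit (heads.length + 2) ch PySem.Set.empty []
    (List.replicate (heads.length + 1) (-1)) [root] 0
  let st := bfsB_rest (heads.length + 2) ch
    (PySem.List.pyRange 1 (PySem.List.len heads + 1)) st
  (st.2.1, st.2.2.1)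

-- ===== PRECONDITION & SPEC =====
-- Pre_ admits exactly the inputs on which the Python A returns: for root in 1..len(heads) A's
-- outer loop never terminates (len(visited) can never exceed n), and for root > len(heads) or
-- root < -(len(heads)+1) A raises IndexError on `time[current] = t`.
def Pre_bfs_py (heads : List Int) (root : Int) : Prop :=
  root = 0 ∨ (-(PySem.List.len heads + 1) ≤ root ∧ root < 0)
instance (heads : List Int) (root : Int) : Decidable (Pre_bfs_py heads root) := by
  unfold Pre_bfs_py; infer_instance
def pvWitness_bfs_py : List Int × Int := ([0], 0)

def Spec_bfs_py (heads : List Int) (root : Int) (out : List Int × List Int) : Prop := out = bfs_py_alt heads root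
instance (heads : List Int) (root : Int) (out : List Int × List Int) : Decidable (Spec_bfs_py heads root out) := by unfold Spec_bfs_py; infer_instance

-- ===== CLAIM (what is proved, stated in full; the proofs are below) =====
def Claim_equal_bfs_py : Prop := ∀ (heads : List Int) (root : Int), Dom_bfs_py heads root → Pre_bfs_py heads root → Spec_bfs_py heads root (bfs_py heads root)

-- ===== LEMMAS AND PROOFS =====

lemma children_getD (heads : List Int) (cur : Int) :
    (bfsB_children heads).getD cur [] =
      ((PySem.List.pyRange 0 (PySem.List.len heads)).filter
        (fun j => PySem.List.pyGetD heads j 0 == cur)).map (fun j => j + 1) := by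
  have h1 : bfsB_children heads =
      ((PySem.List.pyRange 0 (PySem.List.len heads)).map
        (fun j => (PySem.List.pyGetD heads j 0, j + 1))).foldl
        (fun d p => d.modify p.1 [] (fun l => l ++ [p.2])) PySem.Dict.empty := by
    unfold bfsB_children
    rw [PySem.List.enumerate_eq_map_pyRange heads 0, List.foldl_map, List.foldl_map]
  rw [h1, PySem.Dict.getD_foldl_modify_append, List.filter_map, List.map_map]
  rfl
lemma scan_eq (heads : List Int) (vis : PySem.Set Int) (cur : Int) (qs : List Int) :
    bfsA_scan heads vis cur qs =
      qs ++ ((bfsB_children heads).getD cur []).filter (fun c => !(PySem.Set.contains vis c)) := by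
  unfold bfsA_scan
  rw [PySem.List.foldl_append_if
      (p := fun i => (PySem.List.pyGetD heads i 0 == cur) && !(PySem.Set.contains vis (i + 1)))
      (f := fun i => i + 1),
    children_getD, List.filter_map, List.filter_filter]
  congr 1
  congr 1
  apply List.filter_congr
  intro j hj
  simp [Bool.and_comm]
lemma inner_eq (fuel : Nat) (heads : List Int) (vis : PySem.Set Int) (res time q : List Int)
    (t : Int) :
    bfsA_inner fuel heads vis res time q t = bfsB_visit fuel (bfsB_children heads) vis res time q t := by
  induction fuel generalizing vis res time q t with
  | zero => rfl
  | succ fuel ih =>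
    cases q with
    | nil => rfl
    | cons cur qs =>
      show bfsA_inner fuel heads _ _ _ _ _ = bfsB_visit fuel _ _ _ _ _ _
      rw [ih]
      congr 1
      rw [PySem.List.foldl_append_if (p := fun c => !(PySem.Set.contains (PySem.Set.add vis cur) c))
        (f := fun c => c), List.map_id', scan_eq]
lemma visit_inv (heads : List Int) (fuel : Nat) (vis : PySem.Set Int) (res time q : List Int)
    (t : Int) :
    vis <+: (bfsB_visit fuel (bfsB_children heads) vis res time q t).1 ∧
    (∀ x ∈ (bfsB_visit fuel (bfsB_children heads) vis res time q t).1,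
        x ∈ vis ∨ x ∈ q ∨ (1 ≤ x ∧ x ≤ PySem.List.len heads)) ∧
    (vis.Nodup → (bfsB_visit fuel (bfsB_children heads) vis res time q t).1.Nodup) ∧
    (∀ cur qs', q = cur :: qs' → 0 < fuel →
        cur ∈ (bfsB_visit fuel (bfsB_children heads) vis res time q t).1) := by
  induction fuel generalizing vis res time q t with
  | zero =>
    refine ⟨List.prefix_refl _, fun x hx => Or.inl hx, fun h => h, ?_⟩
    intro cur qs' hq hf; omega
  | succ fuel ih =>
    cases q with
    | nil =>
      refine ⟨List.prefix_refl _, fun x hx => Or.inl hx, fun h => h, ?_⟩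
      intro cur qs' hq hf; simp at hq
    | cons cur qs =>
      have hstep : bfsB_visit (fuel + 1) (bfsB_children heads) vis res time (cur :: qs) t =
          bfsB_visit fuel (bfsB_children heads) (PySem.Set.add vis cur) (res ++ [cur])
            (PySem.List.pySetD time cur t)
            (((bfsB_children heads).getD cur []).foldl
              (fun q c => if !(PySem.Set.contains (PySem.Set.add vis cur) c) then q ++ [c] else q) qs)
            (t + 1) := rfl
      rw [hstep]
      obtain ⟨hpre, hmem, hnd, _⟩ := ih (PySem.Set.add vis cur) (res ++ [cur])
        (PySem.List.pySetD time cur t) _ (t + 1)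
      have hadd_pre : vis <+: PySem.Set.add vis cur := by
        unfold PySem.Set.add
        split
        · exact List.prefix_refl _
        · exact ⟨[cur], rfl⟩
      have hcur_mem : cur ∈ PySem.Set.add vis cur := (PySem.Set.mem_add vis cur cur).2 (Or.inr rfl)
      refine ⟨hadd_pre.trans hpre, ?_, ?_, ?_⟩
      · intro x hx
        rcases hmem x hx with h | h | h
        · rcases (PySem.Set.mem_add vis cur x).1 h with h' | h'
          · exact Or.inl h'
          · exact Or.inr (Or.inl (h' ▸ List.mem_cons_self))
        · -- x came from the new queue: old tail or a child from the dict
          rw [PySem.List.foldl_append_if (p := fun c => !(PySem.Set.contains (PySem.Set.add vis cur) c))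
            (f := fun c => c), List.map_id'] at h
          rcases List.mem_append.1 h with h' | h'
          · exact Or.inr (Or.inl (List.mem_cons_of_mem _ h'))
          · have h'' := List.mem_of_mem_filter h'
            rw [children_getD] at h''
            obtain ⟨j, hj, rfl⟩ := List.mem_map.1 h''
            have := PySem.List.mem_pyRange_one.1 (List.mem_of_mem_filter hj)
            exact Or.inr (Or.inr (by omega))
        · exact Or.inr (Or.inr h)
      · intro h
        exact hnd (PySem.Set.nodup_add vis cur h)
      · intro cur' qs' hq _
        have : cur' = cur := by injection hq with h1 h2; exact h1.symm
        subst this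
        exact hpre.subset hcur_mem
lemma find?_pyRange_eq_some {p : Int → Bool} {a b j : Int} (h1 : a ≤ j) (h2 : j < b)
    (h3 : p j = true) (h4 : ∀ i, a ≤ i → i < j → p i = false) :
    (PySem.List.pyRange a b).find? p = some j := by
  obtain ⟨k, hk⟩ : ∃ k : Nat, b - a = k := ⟨(b - a).toNat, by omega⟩
  induction k generalizing a with
  | zero => omega
  | succ k ih =>
    rw [PySem.List.pyRange_one_cons (by omega)]
    by_cases hja : j = a
    · subst hja
      rw [List.find?_cons_of_pos h3]
    · rw [List.find?_cons_of_neg (by rw [h4 a le_rfl (by omega)]; simp)]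
      exact ih (by omega) (fun i hi hij => h4 i (by omega) hij) (by omega)

lemma nodup_pyRange_one (a b : Int) : (PySem.List.pyRange a b).Nodup := by
  obtain ⟨k, hk⟩ : ∃ k : Nat, (b - a).toNat = k := ⟨(b - a).toNat, rfl⟩
  induction k generalizing a with
  | zero => rw [PySem.List.pyRange_one_eq_nil (by omega)]; exact List.nodup_nil
  | succ k ih =>
    rw [PySem.List.pyRange_one_cons (by omega)]
    refine List.nodup_cons.2 ⟨?_, ih (a + 1) (by omega)⟩
    intro hmem
    have := PySem.List.mem_pyRange_one.1 hmem
    omega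

lemma length_pyRange_one (a b : Int) : (PySem.List.pyRange a b).length = (b - a).toNat := by
  obtain ⟨k, hk⟩ : ∃ k : Nat, (b - a).toNat = k := ⟨(b - a).toNat, rfl⟩
  induction k generalizing a with
  | zero => rw [PySem.List.pyRange_one_eq_nil (by omega)]; simp; omega
  | succ k ih =>
    rw [PySem.List.pyRange_one_cons (by omega), List.length_cons, ih (a + 1) (by omega)]
    omega

lemma restart_none (heads : List Int) (vis : PySem.Set Int)
    (h : ∀ v : Int, 1 ≤ v → v ≤ PySem.List.len heads → v ∈ vis) :
    bfsA_restart heads vis = [] := by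
  unfold bfsA_restart
  rw [List.find?_eq_none.2]
  intro i hi
  have hi' := PySem.List.mem_pyRange_one.1 hi
  have : (i + 1) ∈ vis := h (i + 1) (by omega) (by omega)
  simpa using this

lemma restart_some (heads : List Int) (vis : PySem.Set Int) (u : Int)
    (hlo : 1 ≤ u) (hhi : u ≤ PySem.List.len heads) (hu : u ∉ vis)
    (hbelow : ∀ v : Int, 1 ≤ v → v < u → v ∈ vis) :
    bfsA_restart heads vis = [u] := by
  unfold bfsA_restart
  rw [find?_pyRange_eq_some (j := u - 1) (by omega) (by omega) ?hp ?hmin]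
  · show [u - 1 + 1] = [u]
    norm_num
  case hp =>
    have h5 : u - 1 + 1 = u := by norm_num
    rw [h5]
    simpa using hu
  case hmin =>
    intro i hi hij
    have : (i + 1) ∈ vis := hbelow (i + 1) (by omega) (by omega)
    simpa using this
lemma nodup_length_le (l1 l2 : List Int) (h : l1.Nodup) (hs : l1 ⊆ l2) : l1.length ≤ l2.length := by
  calc l1.length = l1.toFinset.card := (List.toFinset_card_of_nodup h).symm
    _ ≤ l2.toFinset.card := Finset.card_le_card (by intro x hx; simp at hx ⊢; exact hs hx)
    _ ≤ l2.length := l2.toFinset_card_le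

lemma vis_full_len (heads : List Int) (root : Int) (vis : PySem.Set Int)
    (hroot : root ∈ vis) (hrle : root ≤ 0)
    (hall : ∀ v : Int, 1 ≤ v → v ≤ PySem.List.len heads → v ∈ vis) :
    ¬ (PySem.Set.len vis ≤ PySem.List.len heads) := by
  set n : Int := PySem.List.len heads with hn
  have hn0 : n = (heads.length : Int) := by simp [hn, PySem.List.len]
  have hsub : (root :: PySem.List.pyRange 1 (n + 1)) ⊆ vis := by
    intro x hx
    rcases List.mem_cons.1 hx with rfl | hx
    · exact hroot
    · have := PySem.List.mem_pyRange_one.1 hx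
      exact hall x (by omega) (by omega)
  have hndL : (root :: PySem.List.pyRange 1 (n + 1)).Nodup := by
    refine List.nodup_cons.2 ⟨?_, nodup_pyRange_one 1 (n + 1)⟩
    intro hmem
    have := PySem.List.mem_pyRange_one.1 hmem
    omega
  have hlen := nodup_length_le _ _ hndL hsub
  rw [List.length_cons, length_pyRange_one] at hlen
  unfold PySem.Set.len
  omega

lemma vis_missing_len (heads : List Int) (root : Int) (vis : PySem.Set Int) (u : Int)
    (hnd : vis.Nodup) (hrle : root ≤ 0)
    (hmem : ∀ x ∈ vis, x = root ∨ (1 ≤ x ∧ x ≤ PySem.List.len heads))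
    (hlo : 1 ≤ u) (hhi : u ≤ PySem.List.len heads) (hu : u ∉ vis) :
    PySem.Set.len vis ≤ PySem.List.len heads := by
  set n : Int := PySem.List.len heads with hn
  have hn0 : n = (heads.length : Int) := by simp [hn, PySem.List.len]
  have huL : u ∈ (root :: PySem.List.pyRange 1 (n + 1)) := by
    exact List.mem_cons.2 (Or.inr (PySem.List.mem_pyRange_one.2 (by omega)))
  have hsub : vis ⊆ (root :: PySem.List.pyRange 1 (n + 1)).erase u := by
    intro x hx
    have hxu : x ≠ u := fun h => hu (h ▸ hx)
    rw [List.mem_erase_of_ne hxu]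
    rcases hmem x hx with rfl | hb
    · exact List.mem_cons_self
    · exact List.mem_cons.2 (Or.inr (PySem.List.mem_pyRange_one.2 (by omega)))
  have hlen := nodup_length_le _ _ hnd hsub
  rw [List.length_erase_of_mem huL, List.length_cons, length_pyRange_one] at hlen
  unfold PySem.Set.len
  omega
lemma outer_eq_rest (heads : List Int) (root : Int) (hroot : root ≤ 0) :
    ∀ (m : Nat) (u : Int) (vis : PySem.Set Int) (res time : List Int) (t : Int) (fuel : Nat),
      1 ≤ u → u + m = PySem.List.len heads + 1 →
      root ∈ vis → vis.Nodup →
      (∀ x ∈ vis, x = root ∨ (1 ≤ x ∧ x ≤ PySem.List.len heads)) →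
      (∀ v : Int, 1 ≤ v → v < u → v ∈ vis) →
      m + 1 ≤ fuel →
      bfsA_outer fuel heads vis res time (bfsA_restart heads vis) t =
        ((bfsB_rest (heads.length + 2) (bfsB_children heads)
            (PySem.List.pyRange u (PySem.List.len heads + 1)) (vis, res, time, t)).2.1,
         (bfsB_rest (heads.length + 2) (bfsB_children heads)
            (PySem.List.pyRange u (PySem.List.len heads + 1)) (vis, res, time, t)).2.2.1) := by
  intro m
  induction m with
  | zero =>
    intro u vis res time t fuel hu1 hum hroot' hnd hmem hbelow hfuel
    have hall : ∀ v : Int, 1 ≤ v → v ≤ PySem.List.len heads → v ∈ vis := by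
      intro v h1 h2; exact hbelow v h1 (by omega)
    rw [PySem.List.pyRange_one_eq_nil (by omega), restart_none heads vis hall]
    obtain ⟨f, rfl⟩ : ∃ f, fuel = f + 1 := ⟨fuel - 1, by omega⟩
    show bfsA_outer (f + 1) heads vis res time [] t = _
    simp only [bfsA_outer, bfsB_rest]
    rw [if_neg (vis_full_len heads root vis hroot' hroot hall)]
  | succ m ih =>
    intro u vis res time t fuel hu1 hum hroot' hnd hmem hbelow hfuel
    rw [PySem.List.pyRange_one_cons (by omega)]
    by_cases hu : u ∈ vis
    · have hB : bfsB_rest (heads.length + 2) (bfsB_children heads)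
          (u :: PySem.List.pyRange (u + 1) (PySem.List.len heads + 1)) (vis, res, time, t) =
          bfsB_rest (heads.length + 2) (bfsB_children heads)
            (PySem.List.pyRange (u + 1) (PySem.List.len heads + 1)) (vis, res, time, t) := by
        simp only [bfsB_rest]
        rw [if_pos ((PySem.Set.contains_iff vis u).2 hu)]
      rw [hB]
      exact ih (u + 1) vis res time t fuel (by omega) (by omega) hroot' hnd hmem
        (by intro v h1 h2; rcases (by omega : v < u ∨ v = u) with h | rfl
            · exact hbelow v h1 h
            · exact hu) (by omega)
    · rw [restart_some heads vis u hu1 (by omega) hu hbelow]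
      obtain ⟨f, rfl⟩ : ∃ f, fuel = f + 1 := ⟨fuel - 1, by omega⟩
      rcases hst : bfsB_visit (heads.length + 2) (bfsB_children heads) vis res time [u] t with
        ⟨vis', res', time', t'⟩
      obtain ⟨hpre, hmem', hnd', hhead⟩ := visit_inv heads (heads.length + 2) vis res time [u] t
      rw [hst] at hpre hmem' hnd' hhead
      have hA : bfsA_outer (f + 1) heads vis res time [u] t =
          bfsA_outer f heads vis' res' time' (bfsA_restart heads vis') t' := by
        simp only [bfsA_outer]
        rw [if_pos (vis_missing_len heads root vis u hnd hroot hmem hu1 (by omega) hu),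
          inner_eq, hst]
      have hB : bfsB_rest (heads.length + 2) (bfsB_children heads)
          (u :: PySem.List.pyRange (u + 1) (PySem.List.len heads + 1)) (vis, res, time, t) =
          bfsB_rest (heads.length + 2) (bfsB_children heads)
            (PySem.List.pyRange (u + 1) (PySem.List.len heads + 1)) (vis', res', time', t') := by
        simp only [bfsB_rest]
        rw [if_neg (by rw [PySem.Set.contains_iff]; exact hu), hst]
      rw [hA, hB]
      refine ih (u + 1) vis' res' time' t' f (by omega) (by omega)
        (hpre.subset hroot') (hnd' hnd) ?_ ?_ (by omega)
      · intro x hx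
        rcases hmem' x hx with h | h | h
        · exact hmem x h
        · simp at h; subst h; exact Or.inr ⟨hu1, by omega⟩
        · exact Or.inr h
      · intro v h1 h2
        rcases (by omega : v < u ∨ v = u) with h | rfl
        · exact hpre.subset (hbelow v h1 h)
        · exact hhead v [] rfl (by omega)

-- ===== VERDICT (by name: the statement is the Claim_ definition above) =====
theorem bfs_py_spec : Claim_equal_bfs_py := by
  unfold Claim_equal_bfs_py Spec_bfs_py
  intro heads root _ hpre
  have hroot : root ≤ 0 := by
    rcases hpre with rfl | ⟨_, h⟩
    · exact le_refl 0
    · omega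
  unfold bfs_py bfs_py_alt
  show bfsA_outer (heads.length + 3) heads PySem.Set.empty []
      (List.replicate (heads.length + 1) (-1)) [root] 0 =
    ((bfsB_rest (heads.length + 2) (bfsB_children heads)
        (PySem.List.pyRange 1 (PySem.List.len heads + 1))
        (bfsB_visit (heads.length + 2) (bfsB_children heads) PySem.Set.empty []
          (List.replicate (heads.length + 1) (-1)) [root] 0)).2.1,
     (bfsB_rest (heads.length + 2) (bfsB_children heads)
        (PySem.List.pyRange 1 (PySem.List.len heads + 1))
        (bfsB_visit (heads.length + 2) (bfsB_children heads) PySem.Set.empty []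
          (List.replicate (heads.length + 1) (-1)) [root] 0)).2.2.1)
  rcases hst : bfsB_visit (heads.length + 2) (bfsB_children heads) PySem.Set.empty []
      (List.replicate (heads.length + 1) (-1)) [root] 0 with ⟨vis', res', time', t'⟩
  obtain ⟨hpre', hmem', hnd', hhead⟩ := visit_inv heads (heads.length + 2) PySem.Set.empty []
    (List.replicate (heads.length + 1) (-1)) [root] 0
  rw [hst] at hpre' hmem' hnd' hhead
  have hA : bfsA_outer (heads.length + 3) heads PySem.Set.empty []
      (List.replicate (heads.length + 1) (-1)) [root] 0 =
      bfsA_outer (heads.length + 2) heads vis' res' time' (bfsA_restart heads vis') t' := by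
    show bfsA_outer ((heads.length + 2) + 1) heads _ _ _ _ _ = _
    simp only [bfsA_outer]
    rw [if_pos (by unfold PySem.Set.len PySem.Set.empty PySem.List.len; simp),
      inner_eq, hst]
  rw [hA]
  have hmain := outer_eq_rest heads root hroot heads.length 1 vis' res' time' t'
    (heads.length + 2) (le_refl 1) (by unfold PySem.List.len; omega)
    (hhead root [] rfl (by omega))
    (hnd' List.nodup_nil)
    (by intro x hx
        rcases hmem' x hx with h | h | h
        · simp [PySem.Set.empty] at h
        · simp at h; subst h; exact Or.inl rfl
        · exact Or.inr h)
    (by intro v h1 h2; omega)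
    (by omega)
  exact hmain
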